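-- pv_equiv track=rewrite | github.com/EmberCodeEx/AutoGrader | a04.py | initialLogic
-- ===== SOURCE A (Python) =====
-- def initialLogic(no_of_lockers, no_of_students):
--     # lockersData = [[0, 1], [0, 1] .... ]
--     lockersData = []
--     for i in range(1, no_of_students + 1):
--         if i == 1:
--             for j in range(1, no_of_lockers + 1):
--                 # first element of locker is locker state == open/close
--                 # second element of locker is no of touches
--                 # 0 == locker close, 1 == locker open
--                 locker = [1, 1]
--                 lockersData.append(locker)
--         else:
--             for k in range(2, no_of_lockers + 1):
--                 # get locker data at index k - 1
--                 locker = lockersData[k - 1]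
--                 # check if index of locker id properly divisible by index of student
--                 if k % i == 0:
--                     # check if locker is closed then open it else close it
--                     if locker[0] == 0:
--                         locker[0] = 1
--                     else:
--                         locker[0] = 0
--                     # increase nuumber of touchers by one
--                     locker[1] = locker[1] + 1
--                     # update locker data
--                     lockersData[k - 1] = locker
--     return lockersData
-- ===== SOURCE B (Python) =====
-- def initialLogic(no_of_lockers, no_of_students):
--     # Per locker: count its divisors among students 1..S (divisors of k exceed
--     # neither k nor S); state is the parity of the touch count.
--     if no_of_students < 1:
--         return []
--     result = []
--     for k in range(1, no_of_lockers + 1):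
--         limit = k if k < no_of_students else no_of_students
--         touches = 0
--         for d in range(1, limit + 1):
--             if k % d == 0:
--                 touches += 1
--         result.append([touches % 2, touches])
--     return result
-- ===== Notes on version B (the rewrite author's own statement) =====
-- stated objective: faster
-- what changed: Instead of simulating every student toggling every locker in a shared array, B computes each locker independently in one pass: the touch count is the number of divisors of the locker index among 1..min(k, students) and the state is the parity of that count; intended as faster (a timing run measured ~4x at every size both finished, unconfirmed at the largest size where both time out).
import Mathlib
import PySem

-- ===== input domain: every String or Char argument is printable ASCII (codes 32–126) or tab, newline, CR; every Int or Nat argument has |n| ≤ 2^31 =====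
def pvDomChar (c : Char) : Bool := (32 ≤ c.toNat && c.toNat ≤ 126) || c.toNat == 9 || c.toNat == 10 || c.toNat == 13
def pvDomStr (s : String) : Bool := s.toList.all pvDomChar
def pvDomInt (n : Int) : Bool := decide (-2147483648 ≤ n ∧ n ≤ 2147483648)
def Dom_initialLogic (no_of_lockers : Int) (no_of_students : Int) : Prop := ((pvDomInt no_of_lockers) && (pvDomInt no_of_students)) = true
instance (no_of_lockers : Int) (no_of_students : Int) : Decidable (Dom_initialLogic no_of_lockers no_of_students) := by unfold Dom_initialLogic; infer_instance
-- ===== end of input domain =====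

-- B replaces A's student-by-student simulation over a shared array by one independent
-- per-locker divisor count (touches, over 1..min(k, students)) whose parity is the state;
-- intended as faster (timing: ~4x at each size both finished, unconfirmed at the largest).

-- ===== PORT A =====
-- Literal port of A: outer loop over students; student 1 builds the list of [1, 1]
-- lockers, each later student i toggles/increments locker k whenever k % i == 0.
-- List reads/writes use pyGetD/pySetD; every index Python performs is in range.
def initialLogic (no_of_lockers : Int) (no_of_students : Int) : List (List Int) :=
  (PySem.List.pyRange 1 (no_of_students + 1) 1).foldl (fun lockersData i =>
    if i == 1 then
      (PySem.List.pyRange 1 (no_of_lockers + 1) 1).foldl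
        (fun d _j => d ++ [[1, 1]]) lockersData
    else
      (PySem.List.pyRange 2 (no_of_lockers + 1) 1).foldl (fun d k =>
        let locker := PySem.List.pyGetD d (k - 1) []
        if PySem.Int.mod k i == 0 then
          let locker' := if PySem.List.pyGetD locker 0 0 == 0
            then PySem.List.pySetD locker 0 1
            else PySem.List.pySetD locker 0 0
          let locker'' := PySem.List.pySetD locker' 1 (PySem.List.pyGetD locker' 1 0 + 1)
          PySem.List.pySetD d (k - 1) locker''
        else d) lockersData) []

-- ===== PORT B =====
-- Literal port of Source B: one pass per locker k, counting divisors d ≤ min(k, students);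
-- the locker is [touches % 2, touches].
def initialLogic_alt (no_of_lockers : Int) (no_of_students : Int) : List (List Int) :=
  if no_of_students < 1 then []
  else
    (PySem.List.pyRange 1 (no_of_lockers + 1) 1).foldl (fun result k =>
      let limit := if k < no_of_students then k else no_of_students
      let touches := (PySem.List.pyRange 1 (limit + 1) 1).foldl
        (fun t d => if PySem.Int.mod k d == 0 then t + 1 else t) 0
      result ++ [[PySem.Int.mod touches 2, touches]]) []

-- ===== PRECONDITION & SPEC =====
def Spec_initialLogic (no_of_lockers : Int) (no_of_students : Int) (out : List (List Int)) : Prop := out = initialLogic_alt no_of_lockers no_of_students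
instance (no_of_lockers : Int) (no_of_students : Int) (out : List (List Int)) : Decidable (Spec_initialLogic no_of_lockers no_of_students out) := by unfold Spec_initialLogic; infer_instance

-- ===== CLAIM (what is proved, stated in full; the proofs are below) =====
def Claim_equal_initialLogic : Prop := ∀ (no_of_lockers : Int) (no_of_students : Int), Dom_initialLogic no_of_lockers no_of_students → Spec_initialLogic no_of_lockers no_of_students (initialLogic no_of_lockers no_of_students)

-- ===== LEMMAS AND PROOFS =====

-- Toggle-and-increment, the body A applies to a touched locker (proof helper).
def pvTouch (locker : List Int) : List Int :=
  let locker' := if PySem.List.pyGetD locker 0 0 == 0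
    then PySem.List.pySetD locker 0 1
    else PySem.List.pySetD locker 0 0
  PySem.List.pySetD locker' 1 (PySem.List.pyGetD locker' 1 0 + 1)

-- One step of A's inner (locker) loop for student i.
def pvStep (i : Int) (d : List (List Int)) (k : Int) : List (List Int) :=
  if PySem.Int.mod k i == 0
  then PySem.List.pySetD d (k - 1) (pvTouch (PySem.List.pyGetD d (k - 1) []))
  else d

lemma pvTouch_pair (a b : Int) :
    pvTouch [a, b] = [if a == 0 then (1 : Int) else 0, b + 1] := by
  by_cases h : a = 0 <;>
    simp [pvTouch, PySem.List.pyGetD, PySem.List.pySetD, PySem.List.pySet?,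
      PySem.List.pyIdx?, PySem.List.pyGet?, h]

lemma map_range_set {α : Type} (n m : Nat) (w : Nat → α) (x : α) :
    ((List.range n).map w).set m x
      = (List.range n).map (fun j => if j = m then x else w j) := by
  apply List.ext_getElem
  · simp
  · intro i h1 h2
    simp only [List.getElem_set, List.getElem_map, List.getElem_range]
    rcases eq_or_ne i m with hi | hi
    · simp [hi]
    · simp [hi, hi.symm]

lemma pass_map (m n : Nat) (hmn : m ≤ n) (i : Int) (v : Nat → List Int) :
    (PySem.List.pyRange 2 ((m : Int) + 1) 1).foldl (pvStep i) ((List.range n).map v)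
      = (List.range n).map (fun idx =>
          if 1 ≤ idx ∧ idx < m ∧ PySem.Int.mod ((idx : Int) + 1) i == 0
          then pvTouch (v idx) else v idx) := by
  induction m with
  | zero =>
    rw [PySem.List.pyRange_one_eq_nil (by norm_num)]
    simp
  | succ m ih =>
    have hm' : m ≤ n := Nat.le_of_succ_le hmn
    have hmn' : m < n := hmn
    have hcast : ((m + 1 : Nat) : Int) + 1 = ((m : Int) + 1) + 1 := by push_cast; ring
    rw [hcast]
    rcases Nat.eq_zero_or_pos m with hm0 | hmpos
    · subst hm0
      rw [PySem.List.pyRange_one_eq_nil (by norm_num)]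
      simp only [List.foldl_nil]
      apply List.map_congr_left
      intro j _
      have : ¬ (1 ≤ j ∧ j < 0 + 1 ∧ PySem.Int.mod ((j : Int) + 1) i == 0) := by omega
      rw [if_neg this]
    · rw [PySem.List.pyRange_one_succ_right (by omega), List.foldl_append,
        ih hm']
      simp only [List.foldl_cons, List.foldl_nil]
      unfold pvStep
      have hidx : ((m : Int) + 1 - 1) = ((m : Nat) : Int) := by ring
      rw [hidx]
      rw [PySem.List.pyGetD_natCast]
      rw [PySem.List.getD_map_range _ _ _ _ hmn']
      have hwm : (if 1 ≤ m ∧ m < m ∧ PySem.Int.mod ((m : Int) + 1) i == 0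
          then pvTouch (v m) else v m) = v m := by
        simp only [if_neg (by omega : ¬ (1 ≤ m ∧ m < m ∧ PySem.Int.mod ((m : Int) + 1) i == 0))]
      rw [hwm]
      by_cases hc : PySem.Int.mod ((m : Int) + 1) i == 0
      · rw [if_pos hc, PySem.List.pySetD_natCast, map_range_set]
        apply List.map_congr_left
        intro j hj
        rcases eq_or_ne j m with hjm | hjm
        · subst hjm
          rw [if_pos rfl, if_pos ⟨hmpos, Nat.lt_succ_self j, hc⟩]
        · rw [if_neg hjm]
          have : (1 ≤ j ∧ j < m ∧ PySem.Int.mod ((j : Int) + 1) i == 0)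
              ↔ (1 ≤ j ∧ j < m + 1 ∧ PySem.Int.mod ((j : Int) + 1) i == 0) := by
            constructor
            · rintro ⟨h1, h2, h3⟩; exact ⟨h1, by omega, h3⟩
            · rintro ⟨h1, h2, h3⟩; exact ⟨h1, by omega, h3⟩
          split_ifs with h1 h2 h2
          · rfl
          · exact absurd (this.mp h1) h2
          · exact absurd (this.mpr h2) h1
          · rfl
      · rw [if_neg hc]
        apply List.map_congr_left
        intro j hj
        rcases eq_or_ne j m with hjm | hjm
        · subst hjm
          rw [if_neg (by omega : ¬ (1 ≤ j ∧ j < j ∧ PySem.Int.mod ((j : Int) + 1) i == 0)),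
            if_neg (fun h => hc h.2.2)]
        · have : (1 ≤ j ∧ j < m ∧ PySem.Int.mod ((j : Int) + 1) i == 0)
              ↔ (1 ≤ j ∧ j < m + 1 ∧ PySem.Int.mod ((j : Int) + 1) i == 0) := by
            constructor
            · rintro ⟨h1, h2, h3⟩; exact ⟨h1, by omega, h3⟩
            · rintro ⟨h1, h2, h3⟩; exact ⟨h1, by omega, h3⟩
          split_ifs with h1 h2 h2
          · rfl
          · exact absurd (this.mp h1) h2
          · exact absurd (this.mpr h2) h1
          · rfl

lemma foldl_pass (is_ : List Int) (n : Nat) (v : Nat → List Int) :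
    is_.foldl (fun data i =>
        (PySem.List.pyRange 2 ((n : Int) + 1) 1).foldl (pvStep i) data)
      ((List.range n).map v)
      = (List.range n).map (fun idx =>
          is_.foldl (fun x i =>
            if 1 ≤ idx ∧ idx < n ∧ PySem.Int.mod ((idx : Int) + 1) i == 0
            then pvTouch x else x) (v idx)) := by
  induction is_ generalizing v with
  | nil => simp
  | cons i is ih =>
    simp only [List.foldl_cons]
    rw [pass_map n n le_rfl i v, ih]

lemma touch_iterate {α : Type} (l : List α) (t : Int) (ht : 0 ≤ t) :
    l.foldl (fun x _ => pvTouch x) [PySem.Int.mod t 2, t]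
      = [PySem.Int.mod (t + l.length) 2, t + (l.length : Int)] := by
  induction l generalizing t with
  | nil => simp
  | cons x l ih =>
    simp only [List.foldl_cons]
    have hmt : PySem.Int.mod t 2 = t % 2 := PySem.Int.mod_eq_emod_of_pos (a := t) (by norm_num)
    have hstep : pvTouch [PySem.Int.mod t 2, t] = [PySem.Int.mod (t + 1) 2, t + 1] := by
      rw [pvTouch_pair, PySem.Int.mod_eq_emod_of_pos (a := t + 1) (by norm_num), hmt]
      have h2 := Int.emod_two_eq t
      rcases h2 with h | h <;> simp [h] <;> omega
    rw [hstep, ih (t + 1) (by omega)]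
    have h1 : t + 1 + (l.length : Int) = t + ((x :: l).length : Int) := by
      simp; ring
    rw [h1]

-- Per-locker touch count of B, zeta-reduced out of B's loop body (proof helper).
def pvTouches (S k : Int) : Int :=
  (PySem.List.pyRange 1 ((if k < S then k else S) + 1) 1).foldl
    (fun t d => if PySem.Int.mod k d == 0 then t + 1 else t) 0

lemma countP_limit (S k : Int) (hk : 2 ≤ k) :
    ((PySem.List.pyRange 1 ((if k < S then k else S) + 1) 1).countP
        (fun d => PySem.Int.mod k d == 0))
      = ((PySem.List.pyRange 1 (S + 1) 1).countP (fun d => PySem.Int.mod k d == 0)) := by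
  by_cases hkS : k < S
  · rw [if_pos hkS]
    rw [PySem.List.pyRange_one_append 1 (k + 1) (S + 1) (by omega) (by omega)]
    rw [List.countP_append]
    have hz : ((PySem.List.pyRange (k + 1) (S + 1) 1).countP
        (fun d => PySem.Int.mod k d == 0)) = 0 := by
      rw [List.countP_eq_zero]
      intro d hd
      rw [PySem.List.mem_pyRange_one] at hd
      have hdpos : 0 < d := by omega
      simp only [beq_iff_eq]
      rw [PySem.Int.mod_eq_emod_of_pos hdpos]
      rw [Int.emod_eq_of_lt (by omega) (by omega)]
      omega
    omega
  · rw [if_neg hkS]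

lemma countP_head (S k : Int) (hS : 1 ≤ S) :
    ((PySem.List.pyRange 1 (S + 1) 1).countP (fun d => PySem.Int.mod k d == 0))
      = ((PySem.List.pyRange 2 (S + 1) 1).countP (fun d => PySem.Int.mod k d == 0)) + 1 := by
  rw [PySem.List.pyRange_one_cons (by omega), List.countP_cons]
  simp

lemma pvTouches_eq (S k : Int) (hS : 1 ≤ S) (hk : 2 ≤ k) :
    pvTouches S k
      = (((PySem.List.pyRange 2 (S + 1) 1).countP
          (fun d => PySem.Int.mod k d == 0) : Nat) : Int) + 1 := by
  unfold pvTouches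
  rw [PySem.List.foldl_if_add_one, countP_limit S k hk, countP_head S k hS]
  push_cast
  ring

lemma pvTouches_one (S : Int) (hS : 1 ≤ S) : pvTouches S 1 = 1 := by
  unfold pvTouches
  have hlim : (if (1 : Int) < S then (1 : Int) else S) = 1 := by
    split_ifs <;> omega
  rw [hlim, show ((1 : Int) + 1) = 1 + 1 from rfl, PySem.List.pyRange_one_singleton]
  simp [PySem.Int.mod_eq_zero_iff_dvd]

lemma cellA_eq_cellB (S : Int) (hS : 1 ≤ S) (n idx : Nat) (hidx : idx < n) :
    (PySem.List.pyRange 2 (S + 1) 1).foldl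
      (fun x i => if 1 ≤ idx ∧ idx < n ∧ PySem.Int.mod ((idx : Int) + 1) i == 0
        then pvTouch x else x) [1, 1]
      = [PySem.Int.mod (pvTouches S ((idx : Int) + 1)) 2, pvTouches S ((idx : Int) + 1)] := by
  rcases Nat.eq_zero_or_pos idx with h0 | hpos
  · subst h0
    rw [PySem.List.foldl_congr_mem
        (g := fun (x : List Int) (_ : Int) => x)
        (h := by intro acc x _; rw [if_neg (by omega)]),
      PySem.List.foldl_ignore]
    rw [show ((0 : Nat) : Int) + 1 = 1 by norm_num, pvTouches_one S hS]
    decide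
  · rw [PySem.List.foldl_congr_mem
        (g := fun (x : List Int) (i : Int) =>
          if (fun i => PySem.Int.mod ((idx : Int) + 1) i == 0) i then pvTouch x else x)
        (h := by
          intro acc i _
          dsimp only
          by_cases hc : PySem.Int.mod ((idx : Int) + 1) i == 0
          · rw [if_pos ⟨hpos, hidx, hc⟩, if_pos hc]
          · rw [if_neg (fun h => hc h.2.2), if_neg hc])]
    rw [PySem.List.foldl_if_eq_foldl_filter]
    have hstart : ([1, 1] : List Int) = [PySem.Int.mod 1 2, 1] := by decide
    rw [hstart, touch_iterate _ 1 (by norm_num)]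
    rw [pvTouches_eq S ((idx : Int) + 1) hS (by omega)]
    rw [← List.countP_eq_length_filter]
    norm_num [Int.add_comm]

-- ===== VERDICT (by name: the statement is the Claim_ definition above) =====
theorem initialLogic_spec : Claim_equal_initialLogic := by
  intro L S _
  show initialLogic L S = initialLogic_alt L S
  by_cases hS : S < 1
  · have hA : PySem.List.pyRange 1 (S + 1) 1 = [] :=
      PySem.List.pyRange_one_eq_nil (by omega)
    simp [initialLogic, initialLogic_alt, hA, hS]
  · have h1S : 1 ≤ S := by omega
    by_cases hL : L < 1
    · have hA1 : PySem.List.pyRange 1 (L + 1) 1 = [] :=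
        PySem.List.pyRange_one_eq_nil (by omega)
      have hA2 : PySem.List.pyRange 2 (L + 1) 1 = [] :=
        PySem.List.pyRange_one_eq_nil (by omega)
      simp [initialLogic, initialLogic_alt, hA1, hA2, hS]
    · have h1L : 1 ≤ L := by omega
      have hLn : L = ((L.toNat : Nat) : Int) := by omega
      rw [initialLogic, initialLogic_alt, if_neg hS, hLn]
      have hfunB : (fun (result : List (List Int)) (k : Int) =>
            let limit := if k < S then k else S
            let touches := (PySem.List.pyRange 1 (limit + 1) 1).foldl
              (fun t d => if PySem.Int.mod k d == 0 then t + 1 else t) 0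
            result ++ [[PySem.Int.mod touches 2, touches]])
          = (fun (result : List (List Int)) (k : Int) =>
            result ++ [[PySem.Int.mod (pvTouches S k) 2, pvTouches S k]]) := rfl
      rw [hfunB]
      rw [PySem.List.foldl_append_singleton_eq_map
        (f := fun k => [PySem.Int.mod (pvTouches S k) 2, pvTouches S k])]
      rw [PySem.List.pyRange_one_cons (show (1 : Int) < S + 1 by omega)]
      simp only [List.foldl_cons, beq_self_eq_true, if_true]
      rw [show ((1 : Int) + 1) = 2 by norm_num]
      rw [PySem.List.foldl_append_singleton_eq_map (f := fun _ => ([1, 1] : List Int))]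
      rw [List.nil_append, List.nil_append]
      rw [PySem.List.pyRange_one 1 (((L.toNat : Nat) : Int) + 1)]
      have hnn : ((((L.toNat : Nat) : Int) + 1) - 1).toNat = L.toNat := by omega
      rw [hnn, List.map_map, List.map_map]
      simp only [Function.comp_def]
      rw [PySem.List.foldl_congr_mem
        (g := fun (data : List (List Int)) (i : Int) =>
          (PySem.List.pyRange 2 (((L.toNat : Nat) : Int) + 1) 1).foldl (pvStep i) data)
        (h := by
          intro acc i hi
          rw [PySem.List.mem_pyRange_one] at hi
          have hne : (i == 1) = false := by simp only [beq_eq_false_iff_ne, ne_eq]; omega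
          rw [hne]
          rfl)]
      rw [foldl_pass (PySem.List.pyRange 2 (S + 1) 1) L.toNat (fun _ => ([1, 1] : List Int))]
      apply List.map_congr_left
      intro idx hidxmem
      rw [List.mem_range] at hidxmem
      rw [show (1 : Int) + (idx : Int) = (idx : Int) + 1 by ring]
      exact cellA_eq_cellB S h1S L.toNat idx hidxmem
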